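-- pv_equiv track=rewrite | github.com/renanfernandes/my-stuff | scripts/nzbgget_sftp_transfer.py | normalize_windows_path
-- ===== SOURCE A (Python) =====
-- def normalize_windows_path(path):
--     """Convert Windows path to proper SFTP format"""
--     if not path:
--         return path
--
--     # Remove leading slash if present before drive letter
--     if path.startswith('/') and len(path) > 1 and path[2] == ':':
--         path = path[1:]
--
--     # Convert backslashes to forward slashes for SFTP
--     path = path.replace('\\', '/')
--
--     # Ensure no double slashes except after drive letter
--     while '//' in path:
--         path = path.replace('//', '/')
--
--     return path
-- ===== SOURCE B (Python) =====
-- def normalize_windows_path(path):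
--     """Convert Windows path to proper SFTP format"""
--     if not path:
--         return path
--
--     # Remove leading slash if present before drive letter
--     if path.startswith('/') and len(path) > 1 and path[2] == ':':
--         path = path[1:]
--
--     # One left-to-right pass: map '\' to '/' and collapse every run of slashes
--     out = []
--     for c in path:
--         if c == '\\':
--             c = '/'
--         if c == '/' and out and out[-1] == '/':
--             continue
--         out.append(c)
--     return ''.join(out)
-- ===== Notes on version B (the rewrite author's own statement) =====
-- stated objective: alternative
-- what changed: A's repeated whole-string double-slash replacement loop (rescan until no double slash remains) is replaced by a single left-to-right pass that maps each backslash to a slash and skips a slash immediately following another, building the output once.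
import Mathlib
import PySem

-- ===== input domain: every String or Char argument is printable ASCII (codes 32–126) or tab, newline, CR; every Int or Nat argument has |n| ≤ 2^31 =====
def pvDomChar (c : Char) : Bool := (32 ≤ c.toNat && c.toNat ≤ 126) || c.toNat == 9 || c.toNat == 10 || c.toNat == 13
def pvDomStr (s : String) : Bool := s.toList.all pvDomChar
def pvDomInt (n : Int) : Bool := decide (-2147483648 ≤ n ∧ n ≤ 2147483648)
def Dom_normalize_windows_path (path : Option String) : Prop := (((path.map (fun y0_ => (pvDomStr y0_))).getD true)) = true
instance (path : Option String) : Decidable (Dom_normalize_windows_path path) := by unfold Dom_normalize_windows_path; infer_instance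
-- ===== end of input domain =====

-- B replaces A's repeated double-slash replacement rescanning loop by one left-to-right pass; objective: alternative (return-value equivalence).

-- ===== PORT A =====

-- One pass of A's double-slash replacement: non-overlapping, left to right.
def repOnce : List Char → List Char
  | [] => []
  | [c] => [c]
  | a :: b :: t => if a = '/' ∧ b = '/' then '/' :: repOnce t else a :: repOnce (b :: t)

theorem repOnce_go_spec : ∀ (fuel : Nat) (l acc : List Char), l.length ≤ fuel →
    PySem.Chars.replace.go ['/', '/'] ['/'] fuel l acc = acc.reverse ++ repOnce l := by
  intro fuel
  induction fuel with
  | zero =>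
    intro l acc h
    have : l = [] := List.eq_nil_of_length_eq_zero (Nat.le_zero.mp h)
    subst this
    simp [PySem.Chars.replace.go, repOnce]
  | succ n ih =>
    intro l acc h
    match l with
    | [] => simp [PySem.Chars.replace.go, repOnce]
    | [c] =>
      simp only [PySem.Chars.replace.go]
      have hp : (['/', '/'] : List Char).isPrefixOf [c] = false := by
        simp [List.isPrefixOf]
      rw [hp]
      simp only [Bool.false_eq_true, if_false]
      rw [ih [] (c :: acc) (by simp)]
      simp [repOnce]
    | a :: b :: t =>
      simp only [PySem.Chars.replace.go]
      by_cases hab : a = '/' ∧ b = '/'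
      · obtain ⟨ha, hb⟩ := hab
        subst ha; subst hb
        have hp : (['/', '/'] : List Char).isPrefixOf ('/' :: '/' :: t) = true := by
          simp [List.isPrefixOf]
        rw [hp]
        simp only [if_true]
        have hlen : t.length ≤ n := by simp at h; omega
        rw [show List.drop (['/', '/'] : List Char).length ('/' :: '/' :: t) = t from rfl]
        simp only [List.reverse_singleton, List.singleton_append]
        rw [ih t (('/' : Char) :: acc) hlen]
        simp [repOnce]
      · have hp : (['/', '/'] : List Char).isPrefixOf (a :: b :: t) = false := by
          apply Bool.eq_false_iff.mpr
          intro hpt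
          have hpre : ['/', '/'] <+: a :: b :: t := List.isPrefixOf_iff_prefix.mp hpt
          rcases List.cons_prefix_cons.mp hpre with ⟨ha, h2⟩
          rcases List.cons_prefix_cons.mp h2 with ⟨hb, _⟩
          exact hab ⟨ha.symm, hb.symm⟩
        rw [hp]
        simp only [Bool.false_eq_true, if_false]
        have hlen : (b :: t).length ≤ n := by simp at h ⊢; omega
        rw [ih (b :: t) (a :: acc) hlen]
        simp [repOnce, hab]

theorem replace_eq_repOnce (l : List Char) :
    PySem.Chars.replace l ['/', '/'] ['/'] = repOnce l := by
  simp only [PySem.Chars.replace, List.isEmpty]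
  rw [repOnce_go_spec l.length l [] le_rfl]
  simp

theorem repOnce_length_le (l : List Char) : (repOnce l).length ≤ l.length := by
  induction l using repOnce.induct with
  | case1 => simp [repOnce]
  | case2 c => simp [repOnce]
  | case3 a b t hab ih => simp only [repOnce, if_pos hab]; simp at ih ⊢; omega
  | case4 a b t hab ih => simp only [repOnce, if_neg hab]; simp at ih ⊢; omega

theorem repOnce_length_lt (l : List Char) (h : ['/', '/'] <:+: l) :
    (repOnce l).length < l.length := by
  induction l using repOnce.induct with
  | case1 => exact absurd (List.eq_nil_of_infix_nil h) (by simp)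
  | case2 c => have := h.length_le; simp at this
  | case3 a b t hab ih =>
    have := repOnce_length_le t
    simp only [repOnce, if_pos hab]
    simp at this ⊢; omega
  | case4 a b t hab ih =>
    have ht : ['/', '/'] <:+: (b :: t) := by
      rcases List.infix_cons_iff.mp h with hp | ht
      · rcases List.cons_prefix_cons.mp hp with ⟨ha, hp2⟩
        rcases List.cons_prefix_cons.mp hp2 with ⟨hb, _⟩
        exact absurd ⟨ha.symm, hb.symm⟩ hab
      · exact ht
    have := ih ht
    simp only [repOnce, if_neg hab]
    simp at this ⊢; omega

-- Strict decrease of one replace pass while '//' is present: cited by pyDedupLoop's decreasing_by.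
theorem replace_toList_lt (s : String) (h : PySem.Str.isIn "//" s = true) :
    (PySem.Str.replace s "//" "/").toList.length < s.toList.length := by
  rw [PySem.Str.toList_replace]
  have h2 : ("//" : String).toList = ['/', '/'] := by decide
  have h1 : ("/" : String).toList = ['/'] := by decide
  rw [h2, h1, replace_eq_repOnce]
  apply repOnce_length_lt
  rw [PySem.Str.isIn_eq, h2] at h
  exact (PySem.Chars.isIn_iff_infix _ _).mp h

-- A's loop: repeatedly replace each double slash by a single one until none remains.
def pyDedupLoop (s : String) : String :=
  if h : PySem.Str.isIn "//" s = true then pyDedupLoop (PySem.Str.replace s "//" "/") else s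
termination_by s.toList.length
decreasing_by exact replace_toList_lt s h

def normalize_windows_path (path : Option String) : Option String :=
  match path with
  | none => none
  | some s =>
    if s.toList.length = 0 then some s
    else
      let s1 := if PySem.Str.startswith s "/" && decide ((1 : Int) < PySem.Str.len s)
                   && (PySem.Str.pyGet? s 2 == some ':')
                then PySem.Str.slice s (some 1) none else s
      let s2 := PySem.Str.replace s1 "\\" "/"
      some (pyDedupLoop s2)

-- ===== PORT B =====

def normalize_windows_path_alt (path : Option String) : Option String :=
  match path with
  | none => none
  | some s =>
    if s.toList.length = 0 then some s
    else
      let s1 := if PySem.Str.startswith s "/" && decide ((1 : Int) < PySem.Str.len s)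
                   && (PySem.Str.pyGet? s 2 == some ':')
                then PySem.Str.slice s (some 1) none else s
      let out := s1.toList.foldl
        (fun acc c0 =>
          let c := if c0 = '\\' then '/' else c0
          if c = '/' ∧ acc.getLast? = some '/' then acc else acc ++ [c]) []
      some (String.ofList out)

-- ===== PRECONDITION & SPEC =====
-- Pre_ excludes exactly the two-character strings whose first character is a slash, on which
-- A (and B alike) raises IndexError when indexing the third character.
def Pre_normalize_windows_path (path : Option String) : Prop :=
  (path.map (fun s => !(decide (s.toList.length = 2) && (s.toList[0]? == some '/')))).getD true = true
instance (path : Option String) : Decidable (Pre_normalize_windows_path path) := by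
  unfold Pre_normalize_windows_path; infer_instance

def pvWitness_normalize_windows_path : Option String := some "/C:\\Users\\me//file"

def Spec_normalize_windows_path (path : Option String) (out : Option String) : Prop :=
  out = normalize_windows_path_alt path
instance (path : Option String) (out : Option String) : Decidable (Spec_normalize_windows_path path out) := by
  unfold Spec_normalize_windows_path; infer_instance

-- ===== CLAIM (what is proved, stated in full; the proofs are below) =====
def Claim_equal_normalize_windows_path : Prop :=
  ∀ (path : Option String), Dom_normalize_windows_path path → Pre_normalize_windows_path path →
    Spec_normalize_windows_path path (normalize_windows_path path)

-- ===== LEMMAS AND PROOFS =====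

-- The backslash-to-slash replacement is a character map (single-character pattern).
def replChar (c : Char) : Char := if c = '\\' then '/' else c

theorem replaceBS_go_spec : ∀ (fuel : Nat) (l acc : List Char), l.length ≤ fuel →
    PySem.Chars.replace.go ['\\'] ['/'] fuel l acc = acc.reverse ++ l.map replChar := by
  intro fuel
  induction fuel with
  | zero =>
    intro l acc h
    have : l = [] := List.eq_nil_of_length_eq_zero (Nat.le_zero.mp h)
    subst this
    simp [PySem.Chars.replace.go]
  | succ n ih =>
    intro l acc h
    match l with
    | [] => simp [PySem.Chars.replace.go]
    | c :: t =>
      simp only [PySem.Chars.replace.go]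
      by_cases hc : c = '\\'
      · subst hc
        have hp : (['\\'] : List Char).isPrefixOf ('\\' :: t) = true := by
          simp [List.isPrefixOf]
        rw [hp]
        simp only [if_true]
        rw [show List.drop (['\\'] : List Char).length ('\\' :: t) = t from rfl]
        simp only [List.reverse_singleton, List.singleton_append]
        rw [ih t ('/' :: acc) (by simp at h; omega)]
        simp [replChar]
      · have hp : (['\\'] : List Char).isPrefixOf (c :: t) = false := by
          apply Bool.eq_false_iff.mpr
          intro hpt
          have hpre : ['\\'] <+: c :: t := List.isPrefixOf_iff_prefix.mp hpt
          exact hc (List.cons_prefix_cons.mp hpre).1.symm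
        rw [hp]
        simp only [Bool.false_eq_true, if_false]
        rw [ih t (c :: acc) (by simp at h; omega)]
        simp [replChar, hc]

theorem replace_eq_map_replChar (l : List Char) :
    PySem.Chars.replace l ['\\'] ['/'] = l.map replChar := by
  simp only [PySem.Chars.replace, List.isEmpty]
  rw [replaceBS_go_spec l.length l [] le_rfl]
  simp

-- The canonical slash-collapsed form: sqA prev l drops every '/' directly after a '/'.
def sqA : Char → List Char → List Char
  | _, [] => []
  | prev, c :: t => if c = '/' ∧ prev = '/' then sqA prev t else c :: sqA c t

def sq0 : List Char → List Char
  | [] => []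
  | c :: t => c :: sqA c t

theorem sqA_no_infix : ∀ (t : List Char) (p : Char), ¬ (['/', '/'] <:+: (p :: t)) → sqA p t = t := by
  intro t
  induction t with
  | nil => intro p _; rfl
  | cons c u ih =>
    intro p h
    by_cases hc : c = '/' ∧ p = '/'
    · exfalso
      apply h
      apply List.infix_cons_iff.mpr
      left
      rw [hc.1, hc.2]
      exact ⟨u, rfl⟩
    · simp only [sqA, if_neg hc]
      rw [ih c (fun hinf => h ((List.infix_cons_iff).mpr (Or.inr hinf)))]

theorem sqA_repOnce : ∀ (n : Nat) (t : List Char), t.length ≤ n → ∀ (p : Char),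
    sqA p (repOnce t) = sqA p t := by
  intro n
  induction n with
  | zero =>
    intro t h p
    have : t = [] := List.eq_nil_of_length_eq_zero (Nat.le_zero.mp h)
    subst this; rfl
  | succ n ih =>
    intro t h p
    match t with
    | [] => rfl
    | [c] => rfl
    | a :: b :: u =>
      by_cases hab : a = '/' ∧ b = '/'
      · obtain ⟨ha, hb⟩ := hab
        subst ha; subst hb
        have e1 : repOnce ('/' :: '/' :: u) = '/' :: repOnce u := by
          simp [repOnce]
        have e2 : ∀ x : List Char, sqA '/' ('/' :: x) = sqA '/' x := by
          intro x; simp [sqA]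
        by_cases hp : p = '/'
        · subst hp
          rw [e1, e2, e2, e2]
          exact ih u (by simp at h; omega) '/'
        · have e3 : ∀ x : List Char, sqA p ('/' :: x) = '/' :: sqA '/' x := by
            intro x
            simp [sqA, hp]
          rw [e1, e3, e3, e2]
          rw [ih u (by simp at h; omega) '/']
      · have e4 : repOnce (a :: b :: u) = a :: repOnce (b :: u) := by
          simp only [repOnce, if_neg hab]
        rw [e4]
        by_cases hap : a = '/' ∧ p = '/'
        · have e5 : ∀ x : List Char, sqA p (a :: x) = sqA p x := by
            intro x; simp [sqA, hap.1, hap.2]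
          rw [e5, e5]
          exact ih (b :: u) (by simp at h ⊢; omega) p
        · have e6 : ∀ x : List Char, sqA p (a :: x) = a :: sqA a x := by
            intro x; simp only [sqA, if_neg hap]
          rw [e6, e6]
          rw [ih (b :: u) (by simp at h ⊢; omega) a]

theorem sq0_repOnce (l : List Char) : sq0 (repOnce l) = sq0 l := by
  match l with
  | [] => rfl
  | [c] => rfl
  | a :: b :: t =>
    by_cases hab : a = '/' ∧ b = '/'
    · obtain ⟨ha, hb⟩ := hab
      subst ha; subst hb
      have e1 : repOnce ('/' :: '/' :: t) = '/' :: repOnce t := by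
        simp [repOnce]
      rw [e1]
      simp only [sq0]
      rw [sqA_repOnce t.length t le_rfl '/']
      simp [sqA]
    · simp only [repOnce, if_neg hab, sq0]
      rw [sqA_repOnce (b :: t).length (b :: t) le_rfl a]

theorem sq0_no_infix (l : List Char) (h : ¬ (['/', '/'] <:+: l)) : sq0 l = l := by
  match l with
  | [] => rfl
  | c :: t => simp only [sq0]; rw [sqA_no_infix t c h]

theorem pyDedupLoop_eq_sq0 : ∀ (n : Nat) (s : String), s.toList.length ≤ n →
    pyDedupLoop s = String.ofList (sq0 s.toList) := by
  intro n
  induction n with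
  | zero =>
    intro s h
    have hnil : s.toList = [] := List.eq_nil_of_length_eq_zero (Nat.le_zero.mp h)
    rw [pyDedupLoop]
    have hin : PySem.Str.isIn "//" s = false := by
      rw [PySem.Str.isIn_eq, hnil]
      decide
    rw [dif_neg (by rw [hin]; exact Bool.false_ne_true)]
    conv_lhs => rw [← (String.ofList_toList (s := s))]
    rw [hnil]
    rfl
  | succ n ih =>
    intro s h
    rw [pyDedupLoop]
    by_cases hin : PySem.Str.isIn "//" s = true
    · rw [dif_pos hin]
      have hlt := replace_toList_lt s hin
      rw [ih (PySem.Str.replace s "//" "/") (by omega)]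
      congr 1
      rw [PySem.Str.toList_replace]
      rw [show ("//" : String).toList = ['/', '/'] from by decide,
          show ("/" : String).toList = ['/'] from by decide]
      rw [replace_eq_repOnce, sq0_repOnce]
    · rw [dif_neg hin]
      have hni : ¬ (['/', '/'] <:+: s.toList) := by
        intro hinf
        apply hin
        rw [PySem.Str.isIn_eq, show ("//" : String).toList = ['/', '/'] from by decide]
        exact (PySem.Chars.isIn_iff_infix _ _).mpr hinf
      rw [sq0_no_infix s.toList hni]
      exact String.ofList_toList.symm

theorem foldl_sqA : ∀ (t acc : List Char) (p : Char), acc.getLast? = some p →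
    t.foldl (fun acc c => if c = '/' ∧ acc.getLast? = some '/' then acc else acc ++ [c]) acc
      = acc ++ sqA p t := by
  intro t
  induction t with
  | nil => intro acc p _; simp [sqA]
  | cons c u ih =>
    intro acc p hlast
    by_cases hcp : c = '/' ∧ p = '/'
    · have htest : (c = '/' ∧ acc.getLast? = some '/') := ⟨hcp.1, by rw [hlast, hcp.2]⟩
      simp only [List.foldl_cons, if_pos htest, sqA, if_pos hcp]
      exact ih acc p hlast
    · have htest : ¬ (c = '/' ∧ acc.getLast? = some '/') := by
        intro ⟨hc, hl⟩
        rw [hlast] at hl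
        exact hcp ⟨hc, (Option.some_inj.mp hl)⟩
      simp only [List.foldl_cons, if_neg htest, sqA, if_neg hcp]
      rw [ih (acc ++ [c]) c (by simp)]
      simp

theorem foldl_eq_sq0 (l : List Char) :
    l.foldl (fun acc c => if c = '/' ∧ acc.getLast? = some '/' then acc else acc ++ [c]) []
      = sq0 l := by
  match l with
  | [] => rfl
  | c :: t =>
    have htest : ¬ (c = '/' ∧ ([] : List Char).getLast? = some '/') := by simp
    simp only [List.foldl_cons, if_neg htest, List.nil_append]
    rw [foldl_sqA t [c] c (by simp)]
    rfl

theorem foldlB_eq_sq0_map (l : List Char) :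
    l.foldl
      (fun acc c0 =>
        let c := if c0 = '\\' then '/' else c0
        if c = '/' ∧ acc.getLast? = some '/' then acc else acc ++ [c]) []
      = sq0 (l.map replChar) := by
  have h1 : (l.map replChar).foldl
      (fun acc c => if c = '/' ∧ acc.getLast? = some '/' then acc else acc ++ [c]) []
      = l.foldl
      (fun acc c0 =>
        let c := if c0 = '\\' then '/' else c0
        if c = '/' ∧ acc.getLast? = some '/' then acc else acc ++ [c]) [] := by
    rw [List.foldl_map]
    rfl
  rw [← h1, foldl_eq_sq0]

-- ===== VERDICT (by name: the statement is the Claim_ definition above) =====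
theorem normalize_windows_path_spec : Claim_equal_normalize_windows_path := by
  unfold Claim_equal_normalize_windows_path
  intro path _ _
  unfold Spec_normalize_windows_path
  cases path with
  | none => rfl
  | some s =>
    simp only [normalize_windows_path, normalize_windows_path_alt]
    by_cases hz : s.toList.length = 0
    · rw [if_pos hz, if_pos hz]
    · rw [if_neg hz, if_neg hz]
      rw [pyDedupLoop_eq_sq0 _ _ le_rfl, foldlB_eq_sq0_map]
      rw [PySem.Str.toList_replace,
          show ("\\" : String).toList = ['\\'] from by decide,
          show ("/" : String).toList = ['/'] from by decide,
          replace_eq_map_replChar]
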